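-- pv_equiv track=rewrite | github.com/MrBrantCode/unitest_baseline | mut_generate/mist_train_cf/cf_88097/solution.py | categorize_names
-- ===== SOURCE A (Python) =====
-- def categorize_names(names):
--     name_dict = {}
--
--     for name in names:
--         length = len(name)
--         if length not in name_dict:
--             name_dict[length] = []
--         name_dict[length].append(name)
--
--     for length in name_dict:
--         name_dict[length].sort(reverse=True)
--
--     return name_dict
-- ===== SOURCE B (Python) =====
-- def categorize_names(names):
--     buckets = {}
--     for name in sorted(names, reverse=True):
--         buckets.setdefault(len(name), []).append(name)
--     return {len(name): buckets[len(name)] for name in names}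
-- ===== Notes on version B (the rewrite author's own statement) =====
-- stated objective: alternative
-- what changed: A buckets names by length and then sorts every bucket in place; B sorts the whole list descending once, buckets the sorted list in one pass (each bucket arrives already descending), and rebuilds the dict in A's key order with a comprehension.
import Mathlib
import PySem

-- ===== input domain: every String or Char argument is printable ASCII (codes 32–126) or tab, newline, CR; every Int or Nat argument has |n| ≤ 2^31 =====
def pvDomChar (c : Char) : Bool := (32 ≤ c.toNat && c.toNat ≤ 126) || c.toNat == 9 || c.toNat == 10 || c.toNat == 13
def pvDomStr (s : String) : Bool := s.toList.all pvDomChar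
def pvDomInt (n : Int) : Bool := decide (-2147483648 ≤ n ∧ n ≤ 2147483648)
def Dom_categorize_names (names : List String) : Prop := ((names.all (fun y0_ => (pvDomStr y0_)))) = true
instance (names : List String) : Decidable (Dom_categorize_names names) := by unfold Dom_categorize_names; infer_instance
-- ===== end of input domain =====

-- B buckets a globally reverse-sorted copy instead of sorting each bucket (alternative decomposition, same cost).

-- ===== PORT A =====
-- first loop: if length not in name_dict: name_dict[length] = [];  name_dict[length].append(name)
-- second loop: for length in name_dict: name_dict[length].sort(reverse=True)
def categorize_names (names : List String) : List (Int × List String) :=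
  let d : PySem.Dict Int (List String) :=
    names.foldl (fun d name =>
      let length : Int := PySem.Str.len name
      let d := if d.contains length then d else d.insert length []
      d.modify length [] (fun v => v ++ [name])) PySem.Dict.empty
  let d := d.keys.foldl (fun d length =>
      d.modify length [] (fun v => PySem.List.sorted v (fun x => x) true)) d
  d.items

-- ===== PORT B =====
-- buckets.setdefault(len(name), []).append(name) over sorted(names, reverse=True),
-- then the dict comprehension {len(name): buckets[len(name)] for name in names}
-- (buckets[len(name)] is always present there; ported as getD with default []).
def categorize_names_alt (names : List String) : List (Int × List String) :=
  let buckets : PySem.Dict Int (List String) :=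
    (PySem.List.sorted names (fun x => x) true).foldl (fun d name =>
      (d.setdefault (PySem.Str.len name) []).modify (PySem.Str.len name) [] (fun v => v ++ [name]))
      PySem.Dict.empty
  (names.foldl (fun d name =>
      d.insert (PySem.Str.len name) (buckets.getD (PySem.Str.len name) [])) PySem.Dict.empty).items

-- ===== PRECONDITION & SPEC =====
def Spec_categorize_names (names : List String) (out : List (Int × List String)) : Prop := out = categorize_names_alt names
instance (names : List String) (out : List (Int × List String)) : Decidable (Spec_categorize_names names out) := by unfold Spec_categorize_names; infer_instance

-- ===== CLAIM (what is proved, stated in full; the proofs are below) =====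
def Claim_equal_categorize_names : Prop := ∀ (names : List String), Dom_categorize_names names → Spec_categorize_names names (categorize_names names)

-- ===== LEMMAS AND PROOFS =====

-- setdefault k [] followed by an append-modify at k is exactly the append-modify at k
theorem setdefault_modify (d : PySem.Dict Int (List String)) (k : Int) (f : List String → List String) :
    (d.setdefault k []).modify k [] f = d.modify k [] f := by
  by_cases h : d.contains k = true
  · rw [PySem.Dict.setdefault_of_contains _ _ h]
  · have h' : d.contains k = false := by simpa using h
    rw [PySem.Dict.setdefault_of_not_contains _ _ h']
    have hall : ∀ p ∈ d.items, ¬ (p.1 == k) = true := by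
      simp only [PySem.Dict.contains, List.any_eq_false] at h'
      exact h'
    have hany : (d.items.any fun p => p.1 == k) = false := List.any_eq_false.mpr hall
    have hnone : d.items.find? (fun p => p.1 == k) = none := List.find?_eq_none.mpr hall
    apply PySem.Dict.ext
    simp only [PySem.Dict.modify, PySem.Dict.insert, PySem.Dict.getD, PySem.Dict.get?,
      PySem.Dict.contains, hany, Bool.false_eq_true, if_false, List.any_append, List.any_cons,
      List.any_nil, beq_self_eq_true, Bool.or_false, Bool.or_true, if_true,
      List.find?_append, hnone]
    simp only [Option.none_or, Option.map_none,
      Option.getD_none, List.map_append, List.map_cons, List.map_nil, beq_self_eq_true, if_true]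
    rw [List.map_congr_left (fun p hp => if_neg (hall p hp))]
    simp

-- A's loop body (if-contains-then-insert, then append) is the same append-modify
theorem stepA_eq_modify (d : PySem.Dict Int (List String)) (name : String) :
    (if d.contains (PySem.Str.len name) = true then d else d.insert (PySem.Str.len name) []).modify
      (PySem.Str.len name) [] (fun v => v ++ [name])
    = d.modify (PySem.Str.len name) [] (fun v => v ++ [name]) := by
  by_cases h : d.contains (PySem.Str.len name) = true
  · rw [if_pos h]
  · rw [if_neg h]
    have h' : d.contains (PySem.Str.len name) = false := by simpa using h
    have := setdefault_modify d (PySem.Str.len name) (fun v => v ++ [name])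
    rwa [PySem.Dict.setdefault_of_not_contains _ _ h'] at this

-- B's loop body is the same append-modify
theorem stepB_eq_modify (d : PySem.Dict Int (List String)) (name : String) :
    (d.setdefault (PySem.Str.len name) []).modify (PySem.Str.len name) [] (fun v => v ++ [name])
    = d.modify (PySem.Str.len name) [] (fun v => v ++ [name]) :=
  setdefault_modify d (PySem.Str.len name) (fun v => v ++ [name])

-- values of the grouping fold: the bucket at L collects, in order, the names of length L
theorem getD_groupFold (xs : List String) (d : PySem.Dict Int (List String)) (L : Int) :
    ((xs.foldl (fun d name => d.modify (PySem.Str.len name) [] (fun v => v ++ [name])) d).getD L [])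
    = d.getD L [] ++ xs.filter (fun n => PySem.Str.len n == L) := by
  have h := PySem.Dict.getD_foldl_modify_append (xs.map (fun n => (PySem.Str.len n, n))) d L
  rw [List.foldl_map] at h
  rw [h, List.filter_map]
  simp [Function.comp_def]

-- applying f to the value at each key of a Nodup key list
theorem getD_sortLoop (f : List String → List String) (ks : List Int) (hks : ks.Nodup)
    (d : PySem.Dict Int (List String)) (k : Int) :
    ((ks.foldl (fun d L => d.modify L [] f) d).getD k [])
    = if k ∈ ks then f (d.getD k []) else d.getD k [] := by
  induction ks generalizing d with
  | nil => simp
  | cons L t ih =>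
    rcases List.nodup_cons.mp hks with ⟨hL, ht⟩
    by_cases hk : k = L
    · subst hk
      simp only [List.foldl_cons, ih ht, if_neg hL, PySem.Dict.getD_modify]
      simp
    · simp only [List.foldl_cons, ih ht, PySem.Dict.getD_modify, if_neg hk, List.mem_cons]
      simp [hk]

-- the rebuild fold of B: the value at a key present in the list is g of that key
theorem getD_rebuild (g : Int → List String) (xs : List String) (d : PySem.Dict Int (List String)) (k : Int) :
    ((xs.foldl (fun d n => d.insert (PySem.Str.len n) (g (PySem.Str.len n))) d).getD k [])
    = if k ∈ xs.map (fun n => PySem.Str.len n) then g k else d.getD k [] := by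
  induction xs generalizing d with
  | nil => simp
  | cons n t ih =>
    rw [List.foldl_cons, ih, List.map_cons]
    by_cases hk : k ∈ t.map (fun n => PySem.Str.len n)
    · rw [if_pos hk, if_pos (List.mem_cons_of_mem _ hk)]
    · rw [if_neg hk, PySem.Dict.getD_insert]
      by_cases hn : k = PySem.Str.len n
      · rw [if_pos hn, if_pos (by rw [hn]; exact List.mem_cons_self ..), hn]
      · rw [if_neg hn, if_neg (by
          simp only [List.mem_cons, not_or]
          exact ⟨hn, hk⟩)]

-- descending sort is unique: any ≥-ordered rearrangement of xs IS sorted(xs, reverse=True)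
theorem sorted_rev_id_unique (xs ys : List String) (hp : ys.Perm xs)
    (ho : ys.Pairwise (fun a b => b ≤ a)) : PySem.List.sorted xs (fun x => x) true = ys := by
  have h1 : PySem.List.sorted xs (fun x => x) false = ys.reverse :=
    PySem.List.sorted_id_eq_of_perm_of_pairwise xs ys.reverse
      ((ys.reverse_perm).trans hp) (List.pairwise_reverse.mpr ho)
  have h2 : PySem.List.sorted xs (fun x => x) false = (PySem.List.sorted xs (fun x => x) true).reverse :=
    PySem.List.sorted_id_eq_of_perm_of_pairwise xs _
      (((PySem.List.sorted xs (fun x => x) true).reverse_perm).trans (PySem.List.sorted_perm xs _ true))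
      (List.pairwise_reverse.mpr (PySem.List.sorted_pairwise_rev xs (fun x => x)))
  have := h2.symm.trans h1
  have := congrArg List.reverse this
  simpa using this

-- filtering commutes with the global descending sort
theorem filter_sorted_rev (p : String → Bool) (xs : List String) :
    (PySem.List.sorted xs (fun x => x) true).filter p
    = PySem.List.sorted (xs.filter p) (fun x => x) true :=
  (sorted_rev_id_unique (xs.filter p) _
    ((PySem.List.sorted_perm xs _ true).filter p)
    ((PySem.List.sorted_pairwise_rev xs (fun x => x)).filter p)).symm

-- Set.update s l = s when every element of l is already in s
theorem set_update_of_subset (s : PySem.Set Int) (l : List Int) (h : ∀ x ∈ l, x ∈ s) :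
    PySem.Set.update s l = s := by
  induction l generalizing s with
  | nil => rfl
  | cons x t ih =>
    have hx : PySem.Set.add s x = s := by
      have : s.contains x = true := by
        simpa [PySem.Set.contains] using h x (List.mem_cons_self ..)
      simp only [PySem.Set.add]
      rw [if_pos this]
    simp only [PySem.Set.update, List.foldl_cons]
    rw [show List.foldl PySem.Set.add (PySem.Set.add s x) t = PySem.Set.update (PySem.Set.add s x) t from rfl,
        hx, ih s (fun y hy => h y (by simp [hy]))]

-- ===== VERDICT (by name: the statement is the Claim_ definition above) =====
theorem categorize_names_spec : Claim_equal_categorize_names := by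
  intro names _
  unfold Spec_categorize_names categorize_names categorize_names_alt
  simp only []
  rw [show (fun (d : PySem.Dict Int (List String)) (name : String) =>
        (if d.contains (PySem.Str.len name) = true then d else d.insert (PySem.Str.len name) []).modify
          (PySem.Str.len name) [] (fun v => v ++ [name]))
      = (fun (d : PySem.Dict Int (List String)) (name : String) =>
        d.modify (PySem.Str.len name) [] (fun v => v ++ [name])) from funext₂ stepA_eq_modify,
      show (fun (d : PySem.Dict Int (List String)) (name : String) =>
        (d.setdefault (PySem.Str.len name) []).modify (PySem.Str.len name) [] (fun v => v ++ [name]))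
      = (fun (d : PySem.Dict Int (List String)) (name : String) =>
        d.modify (PySem.Str.len name) [] (fun v => v ++ [name])) from funext₂ stepB_eq_modify]
  set K : List Int := PySem.Set.ofList (names.map (fun n => PySem.Str.len n)) with hK
  -- A's dict after the grouping loop
  set d1 : PySem.Dict Int (List String) :=
    names.foldl (fun d name => d.modify (PySem.Str.len name) [] (fun v => v ++ [name])) PySem.Dict.empty with hd1
  have hkeys1 : d1.keys = K := by
    rw [hd1, PySem.Dict.keys_foldl_modify_key names (fun n => PySem.Str.len n) [] (fun _ n => fun v => v ++ [n])]
    rfl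
  have hnd1 : d1.keys.Nodup := by
    rw [hkeys1, hK]; exact PySem.Set.nodup_ofList _
  -- A's dict after the per-bucket sorting loop
  set d2 : PySem.Dict Int (List String) :=
    d1.keys.foldl (fun d L => d.modify L [] (fun v => PySem.List.sorted v (fun x => x) true)) d1 with hd2
  have hkeys2 : d2.keys = K := by
    rw [hd2, PySem.Dict.keys_foldl_modify_key d1.keys (fun L => L) [] (fun _ _ => fun v => PySem.List.sorted v (fun x => x) true)]
    rw [List.map_id', hkeys1]
    exact set_update_of_subset K K (fun x hx => hx)
  have hnd2 : d2.keys.Nodup := by rw [hkeys2, hK]; exact PySem.Set.nodup_ofList _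
  have hgetD2 : ∀ k ∈ K, d2.getD k [] =
      PySem.List.sorted (names.filter (fun n => PySem.Str.len n == k)) (fun x => x) true := by
    intro k hk
    rw [hd2, getD_sortLoop _ d1.keys hnd1 d1 k, if_pos (by rwa [hkeys1]), hd1,
        getD_groupFold names PySem.Dict.empty k]
    simp [PySem.Dict.getD, PySem.Dict.get?, PySem.Dict.empty]
  -- B's buckets dict
  set bk : PySem.Dict Int (List String) :=
    (PySem.List.sorted names (fun x => x) true).foldl
      (fun d name => d.modify (PySem.Str.len name) [] (fun v => v ++ [name])) PySem.Dict.empty with hbk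
  have hbkgetD : ∀ k : Int, bk.getD k [] =
      PySem.List.sorted (names.filter (fun n => PySem.Str.len n == k)) (fun x => x) true := by
    intro k
    rw [hbk, getD_groupFold _ PySem.Dict.empty k]
    simp only [PySem.Dict.getD, PySem.Dict.get?, PySem.Dict.empty, List.find?_nil,
      Option.map_none, Option.getD_none, List.nil_append]
    exact filter_sorted_rev (fun n => PySem.Str.len n == k) names
  -- B's rebuilt dict
  set e : PySem.Dict Int (List String) :=
    names.foldl (fun d name => d.insert (PySem.Str.len name) (bk.getD (PySem.Str.len name) [])) PySem.Dict.empty with he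
  have hkeysE : e.keys = K := by
    rw [he, PySem.Dict.keys_foldl_insert_key names (fun n => PySem.Str.len n) (fun _ n => bk.getD (PySem.Str.len n) [])]
    rfl
  have hndE : e.keys.Nodup := by rw [hkeysE, hK]; exact PySem.Set.nodup_ofList _
  have hgetDE : ∀ k ∈ K, e.getD k [] = bk.getD k [] := by
    intro k hk
    have hk' : k ∈ names.map (fun n => PySem.Str.len n) :=
      (PySem.Set.mem_ofList _ _).mp (hK ▸ hk)
    rw [he, getD_rebuild (fun L => bk.getD L []) names PySem.Dict.empty k, if_pos hk']
  -- items of both dicts are the same map over the same key list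
  rw [PySem.Dict.items_eq_map_keys d2 hnd2 [], PySem.Dict.items_eq_map_keys e hndE [],
      hkeys2, hkeysE]
  exact List.map_congr_left (fun k hk => by rw [hgetD2 k hk, hgetDE k hk, hbkgetD k])
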